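-- pv_equiv track=rewrite | github.com/sjkuhnke/PokemonGame | stuff/changelog/convert_changelog.py | categorize_entry_by_names
-- ===== SOURCE A (Python) =====
-- def categorize_entry_by_names(entry, pokemon_names, trainer_names, move_names):
--     """Categorize entry based on Pokemon, Trainer, and Move name detection."""
--     first_line = entry.split('\n')[0].lower()
--
--     # Check for trainer names first (highest priority)
--     for trainer_name in trainer_names:
--         if trainer_name in first_line:
--             return "Trainer Changes"
--
--     # Check for Pokemon names second
--     for pokemon_name in pokemon_names:
--         if pokemon_name in first_line:
--             return "Pokemon Changes"
--
--     # Check for move names last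
--     for move_name in move_names:
--         if move_name in first_line:
--             return "Move Changes"
--
--     return None
-- ===== SOURCE B (Python) =====
-- def categorize_entry_by_names(entry, pokemon_names, trainer_names, move_names):
--     """Categorize entry based on Pokemon, Trainer, and Move name detection."""
--     line = entry.split('\n')[0].lower()
--     labels = ("Trainer Changes", "Pokemon Changes", "Move Changes")
--     # index every name once, keyed by name, valued by its best (smallest) rank
--     rank_of = {}
--     for rank, names in enumerate((trainer_names, pokemon_names, move_names)):
--         for name in names:
--             if name not in rank_of:
--                 rank_of[name] = rank
--     # enumerate the substrings of the (short) first line instead of scanning the name lists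
--     best = 3
--     for k in set(len(name) for name in rank_of):
--         for i in range(len(line) - k + 1):
--             r = rank_of.get(line[i:i + k], 3)
--             if r < best:
--                 best = r
--     return labels[best] if best < 3 else None
-- ===== Notes on version B (the rewrite author's own statement) =====
-- stated objective: alternative
-- what changed: Instead of running one substring search per name over every name list, B builds a single hash index name->category-rank and then enumerates the aligned substrings of the first line (one pass per distinct name length), looking each up and keeping the smallest rank.
import Mathlib
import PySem

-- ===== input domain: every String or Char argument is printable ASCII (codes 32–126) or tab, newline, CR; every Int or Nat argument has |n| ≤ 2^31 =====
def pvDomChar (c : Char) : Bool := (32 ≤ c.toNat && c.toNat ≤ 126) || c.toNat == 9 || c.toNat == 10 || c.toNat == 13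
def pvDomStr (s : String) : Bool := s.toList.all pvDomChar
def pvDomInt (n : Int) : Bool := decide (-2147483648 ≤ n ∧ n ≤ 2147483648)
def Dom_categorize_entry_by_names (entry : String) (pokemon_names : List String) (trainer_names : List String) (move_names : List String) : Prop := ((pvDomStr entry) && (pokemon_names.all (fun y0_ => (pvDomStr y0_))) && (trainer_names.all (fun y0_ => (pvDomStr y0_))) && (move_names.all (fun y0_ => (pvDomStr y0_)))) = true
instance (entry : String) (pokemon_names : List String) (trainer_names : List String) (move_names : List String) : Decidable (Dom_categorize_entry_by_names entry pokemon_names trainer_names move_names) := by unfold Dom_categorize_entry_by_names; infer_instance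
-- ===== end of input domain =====

-- ===== PORT A =====
-- B changes: one name->rank hash index plus a scan of the first line's aligned substrings replaces the per-name substring searches over the name lists (objective: alternative algorithm, same result).
def categorize_entry_by_names (entry : String) (pokemon_names : List String) (trainer_names : List String) (move_names : List String) : Option String :=
  let first_line := PySem.Str.lower (((PySem.Str.split? entry "\n").getD []).headD "")
  if trainer_names.any (fun trainer_name => PySem.Str.isIn trainer_name first_line) then
    some "Trainer Changes"
  else if pokemon_names.any (fun pokemon_name => PySem.Str.isIn pokemon_name first_line) then
    some "Pokemon Changes"
  else if move_names.any (fun move_name => PySem.Str.isIn move_name first_line) then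
    some "Move Changes"
  else
    none

-- ===== PORT B =====
-- inner loop of the index-building pass: `if name not in rank_of: rank_of[name] = rank`
def pvAddNames (d : PySem.Dict String Nat) (rank : Nat) (names : List String) : PySem.Dict String Nat :=
  names.foldl (fun d name => if d.contains name then d else d.insert name rank) d

def categorize_entry_by_names_alt (entry : String) (pokemon_names : List String) (trainer_names : List String) (move_names : List String) : Option String :=
  let line := PySem.Str.lower (((PySem.Str.split? entry "\n").getD []).headD "")
  let labels : List String := ["Trainer Changes", "Pokemon Changes", "Move Changes"]
  let rank_of := [(0, trainer_names), (1, pokemon_names), (2, move_names)].foldl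
    (fun d (pr : Nat × List String) => pvAddNames d pr.1 pr.2) PySem.Dict.empty
  let lengths := PySem.Set.ofList (rank_of.keys.map (fun name => PySem.Str.len name))
  let best := lengths.foldl (fun best k =>
    (PySem.List.pyRange 0 ((PySem.Str.len line : Int) - (k : Int) + 1) 1).foldl (fun best i =>
      let r := rank_of.getD (PySem.Str.slice line (some i) (some (i + (k : Int)))) 3
      if r < best then r else best) best) 3
  if best < 3 then some (PySem.List.pyGetD labels (best : Int) "") else none

-- ===== PRECONDITION & SPEC =====
def Spec_categorize_entry_by_names (entry : String) (pokemon_names : List String) (trainer_names : List String) (move_names : List String) (out : Option String) : Prop := out = categorize_entry_by_names_alt entry pokemon_names trainer_names move_names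
instance (entry : String) (pokemon_names : List String) (trainer_names : List String) (move_names : List String) (out : Option String) : Decidable (Spec_categorize_entry_by_names entry pokemon_names trainer_names move_names out) := by unfold Spec_categorize_entry_by_names; infer_instance

-- ===== CLAIM (what is proved, stated in full; the proofs are below) =====
def Claim_equal_categorize_entry_by_names : Prop := ∀ (entry : String) (pokemon_names : List String) (trainer_names : List String) (move_names : List String), Dom_categorize_entry_by_names entry pokemon_names trainer_names move_names → Spec_categorize_entry_by_names entry pokemon_names trainer_names move_names (categorize_entry_by_names entry pokemon_names trainer_names move_names)


-- ===== LEMMAS AND PROOFS =====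

-- abbreviation for the index built by port B's first pass (proof-side name)
def pvRanks (t p m : List String) : PySem.Dict String Nat :=
  pvAddNames (pvAddNames (pvAddNames PySem.Dict.empty 0 t) 1 p) 2 m

-- the running minimum kept by port B's scan phase
def pvMinf (b : Nat) (xs : List Nat) : Nat := xs.foldl (fun b r => if r < b then r else b) b

-- the multiset of ranks port B's scan phase looks up
def pvVals (t p m : List String) (line : String) : List Nat :=
  (PySem.Set.ofList ((pvRanks t p m).keys.map (fun name => PySem.Str.len name))).flatMap
    (fun k => (PySem.List.pyRange 0 ((PySem.Str.len line : Int) - (k : Int) + 1) 1).map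
      (fun i => (pvRanks t p m).getD (PySem.Str.slice line (some i) (some (i + (k : Int)))) 3))

-- what the index-building inner loop leaves in the dict
theorem pvGet_addNames (d : PySem.Dict String Nat) (r : Nat) (names : List String) (x : String) :
    (pvAddNames d r names).get? x
      = ((d.get? x).orElse (fun _ => if x ∈ names then some r else none)) := by
  induction names generalizing d with
  | nil => simp [pvAddNames, Option.orElse]; cases d.get? x <;> rfl
  | cons n ns ih =>
    show (pvAddNames (if d.contains n then d else d.insert n r) r ns).get? x = _
    rw [ih]
    by_cases hx : x = n
    · subst hx
      by_cases hc : d.contains x = true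
      · rw [if_pos hc]
        rw [PySem.Dict.contains_eq_isSome_get?] at hc
        obtain ⟨v, hv⟩ := Option.isSome_iff_exists.mp hc
        simp [hv, Option.orElse]
      · rw [if_neg hc]
        have hnone : d.get? x = none := by
          rw [PySem.Dict.contains_eq_isSome_get?] at hc
          cases h : d.get? x <;> simp [h] at hc ⊢
        simp [hnone, PySem.Dict.get?_insert_self, Option.orElse]
    · have hget : (if d.contains n then d else d.insert n r).get? x = d.get? x := by
        split
        · rfl
        · exact PySem.Dict.get?_insert_of_ne (hne := hx) ..
      rw [hget]
      simp [hx, Option.orElse]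

-- the full index: categories are inserted in priority order, first insertion wins
theorem pvGet_rank (t p m : List String) (x : String) :
    (pvRanks t p m).get? x
      = (if x ∈ t then some 0 else if x ∈ p then some 1 else if x ∈ m then some 2 else none) := by
  unfold pvRanks
  rw [pvGet_addNames, pvGet_addNames, pvGet_addNames, PySem.Dict.get?_empty]
  by_cases h1 : x ∈ t <;> by_cases h2 : x ∈ p <;> by_cases h3 : x ∈ m <;>
    simp [h1, h2, h3, Option.orElse]

-- substring occurrence as "some aligned window equals the pattern" (list level)
theorem pvIsIn_iff_window (s n : List Char) :
    PySem.Chars.isIn n s = true ↔ ∃ j : Nat, j + n.length ≤ s.length ∧ (s.drop j).take n.length = n := by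
  rw [← PySem.Chars.exists_prefix_drop_iff_isIn]
  constructor
  · rintro ⟨j, hpre⟩
    by_cases hj : j ≤ s.length
    · refine ⟨j, ?_, ?_⟩
      · have := hpre.length_le
        simp [List.length_drop] at this
        omega
      · exact (List.prefix_iff_eq_take.mp hpre).symm
    · have hd : s.drop j = [] := by
        apply List.drop_eq_nil_of_le; omega
      rw [hd] at hpre
      have hn : n = [] := List.prefix_nil.mp hpre
      exact ⟨0, by simp [hn], by simp [hn]⟩
  · rintro ⟨j, _, heq⟩
    exact ⟨j, heq ▸ List.take_prefix ..⟩

-- the running minimum is at most its seed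
theorem pvMinf_le_init (xs : List Nat) (b : Nat) : pvMinf b xs ≤ b := by
  induction xs generalizing b with
  | nil => simp [pvMinf]
  | cons x xs ih =>
    show pvMinf (if x < b then x else b) xs ≤ b
    by_cases hxb : x < b
    · rw [if_pos hxb]; exact le_trans (ih x) (le_of_lt hxb)
    · rw [if_neg hxb]; exact ih b

-- the running minimum is at most every scanned value
theorem pvMinf_le_mem (xs : List Nat) (b r : Nat) (h : r ∈ xs) : pvMinf b xs ≤ r := by
  induction xs generalizing b with
  | nil => simp at h
  | cons x xs ih =>
    show pvMinf (if x < b then x else b) xs ≤ r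
    rcases List.mem_cons.mp h with rfl | hm
    · refine le_trans (pvMinf_le_init xs _) ?_
      split <;> omega
    · exact ih _ hm

-- the running minimum is the seed or a scanned value
theorem pvMinf_mem (xs : List Nat) (b : Nat) : pvMinf b xs = b ∨ pvMinf b xs ∈ xs := by
  induction xs generalizing b with
  | nil => left; rfl
  | cons x xs ih =>
    have hred : pvMinf b (x :: xs) = pvMinf (if x < b then x else b) xs := rfl
    rw [hred]
    by_cases hxb : x < b
    · rw [if_pos hxb]
      rcases ih x with h | h
      · right; rw [h]; exact List.mem_cons_self ..
      · right; exact List.mem_cons_of_mem _ h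
    · rw [if_neg hxb]
      rcases ih b with h | h
      · left; exact h
      · right; exact List.mem_cons_of_mem _ h

-- a rank r < 3 is scanned iff some indexed name with that rank occurs in the line
theorem pvMem_vals (t p m : List String) (line : String) (r : Nat) (hr : r < 3) :
    r ∈ pvVals t p m line
      ↔ ∃ n, (pvRanks t p m).get? n = some r ∧ PySem.Str.isIn n line = true := by
  constructor
  · intro h
    rw [pvVals, List.mem_flatMap] at h
    obtain ⟨k, hkmem, hmem⟩ := h
    rw [PySem.Set.mem_ofList, List.mem_map] at hkmem
    obtain ⟨nm, _, hk⟩ := hkmem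
    have hk0 : 0 ≤ k := by
      rw [← hk, PySem.Str.len_eq]; exact Int.natCast_nonneg _
    rw [List.mem_map] at hmem
    obtain ⟨i, hi, hval⟩ := hmem
    rw [PySem.List.mem_pyRange_one] at hi
    refine ⟨PySem.Str.slice line (some i) (some (i + k)), ?_, ?_⟩
    · rw [PySem.Dict.getD_eq_get?_getD] at hval
      cases hget : (pvRanks t p m).get? (PySem.Str.slice line (some i) (some (i + k))) with
      | none => rw [hget] at hval; simp at hval; omega
      | some v => rw [hget] at hval; simp at hval; rw [hval]
    · -- every slice of the line is an infix of the line
      have hsl : PySem.Chars.slice line.toList (some i) (some (i + k))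
          = (line.toList.drop i.toNat).take ((i + k).toNat - i.toNat) :=
        PySem.List.slice_toNat line.toList hi.1 (by omega : (0:Int) ≤ i + k)
      rw [PySem.Str.isIn_eq, PySem.Chars.isIn_iff_infix, PySem.Str.toList_slice, hsl]
      exact ((List.take_prefix ..).isInfix.trans (List.drop_suffix ..).isInfix)
  · rintro ⟨n, hget, hocc⟩
    rw [PySem.Str.isIn_eq, pvIsIn_iff_window] at hocc
    obtain ⟨j, hlen, heq⟩ := hocc
    rw [pvVals, List.mem_flatMap]
    refine ⟨PySem.Str.len n, ?_, ?_⟩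
    · rw [PySem.Set.mem_ofList, List.mem_map]
      refine ⟨n, ?_, rfl⟩
      rw [← PySem.Dict.contains_iff_mem_keys, PySem.Dict.contains_eq_isSome_get?, hget]
      rfl
    · rw [List.mem_map]
      refine ⟨(j : Int), ?_, ?_⟩
      · rw [PySem.List.mem_pyRange_one]
        refine ⟨Int.natCast_nonneg j, ?_⟩
        rw [PySem.Str.len_eq, PySem.Str.len_eq]
        omega
      · have hsl : PySem.Chars.slice line.toList (some (j : Int)) (some ((j : Int) + PySem.Str.len n))
            = (line.toList.drop j).take n.toList.length := by
          rw [PySem.Str.len_eq]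
          exact PySem.List.slice_natCast_add ..
        have hslice : PySem.Str.slice line (some (j : Int)) (some ((j : Int) + PySem.Str.len n)) = n := by
          apply String.toList_inj.mp
          rw [PySem.Str.toList_slice, hsl]
          exact heq
        rw [hslice, PySem.Dict.getD_eq_get?_getD, hget]
        rfl

-- the scan phase computes exactly A's priority decision, as a number
theorem pvBest_eq (t p m : List String) (line : String) :
    pvMinf 3 (pvVals t p m line)
      = (if t.any (fun n => PySem.Str.isIn n line) then 0
         else if p.any (fun n => PySem.Str.isIn n line) then 1
         else if m.any (fun n => PySem.Str.isIn n line) then 2 else 3) := by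
  have hT : t.any (fun n => PySem.Str.isIn n line) = true ↔ (0 : Nat) ∈ pvVals t p m line := by
    rw [List.any_eq_true, pvMem_vals t p m line 0 (by omega)]
    constructor
    · rintro ⟨n, hn, hocc⟩
      exact ⟨n, by rw [pvGet_rank]; simp [hn], hocc⟩
    · rintro ⟨n, hget, hocc⟩
      rw [pvGet_rank] at hget
      refine ⟨n, ?_, hocc⟩
      by_cases h1 : n ∈ t
      · exact h1
      · simp [h1] at hget; split_ifs at hget <;> simp_all
  have h1of : (1 : Nat) ∈ pvVals t p m line → p.any (fun n => PySem.Str.isIn n line) = true := by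
    intro h
    obtain ⟨n, hget, hocc⟩ := (pvMem_vals t p m line 1 (by omega)).mp h
    rw [pvGet_rank] at hget
    rw [List.any_eq_true]
    refine ⟨n, ?_, hocc⟩
    split_ifs at hget with h1 h2 h3
    all_goals simp_all
  have h2of : (2 : Nat) ∈ pvVals t p m line → m.any (fun n => PySem.Str.isIn n line) = true := by
    intro h
    obtain ⟨n, hget, hocc⟩ := (pvMem_vals t p m line 2 (by omega)).mp h
    rw [pvGet_rank] at hget
    rw [List.any_eq_true]
    refine ⟨n, ?_, hocc⟩
    split_ifs at hget with h1 h2 h3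
    all_goals simp_all
  cases hTv : t.any (fun n => PySem.Str.isIn n line) with
  | true =>
    have h0 : (0 : Nat) ∈ pvVals t p m line := by
      rw [← hT, List.any_eq_true]; rw [List.any_eq_true] at hTv; exact hTv
    have := pvMinf_le_mem _ 3 0 h0
    show pvMinf 3 (pvVals t p m line) = 0
    omega
  | false =>
    have hT0 : (0 : Nat) ∉ pvVals t p m line := fun h => by rw [hT.mpr h] at hTv; exact Bool.noConfusion hTv
    cases hPv : p.any (fun n => PySem.Str.isIn n line) with
    | true =>
      have h1 : (1 : Nat) ∈ pvVals t p m line := by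
        rw [List.any_eq_true] at hPv
        obtain ⟨n, hn, hocc⟩ := hPv
        have hnt : n ∉ t := by
          intro hmem
          exact hT0 (hT.mp (by rw [List.any_eq_true]; exact ⟨n, hmem, hocc⟩))
        exact (pvMem_vals t p m line 1 (by omega)).mpr ⟨n, by rw [pvGet_rank]; simp [hnt, hn], hocc⟩
      have hle := pvMinf_le_mem _ 3 1 h1
      have hne0 : pvMinf 3 (pvVals t p m line) ≠ 0 := by
        intro h
        rcases pvMinf_mem (pvVals t p m line) 3 with hm | hm
        · omega
        · rw [h] at hm; exact hT0 hm
      show pvMinf 3 (pvVals t p m line) = 1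
      omega
    | false =>
      have hP1 : (1 : Nat) ∉ pvVals t p m line := fun h => by rw [h1of h] at hPv; exact Bool.noConfusion hPv
      cases hMv : m.any (fun n => PySem.Str.isIn n line) with
      | true =>
        have h2 : (2 : Nat) ∈ pvVals t p m line := by
          rw [List.any_eq_true] at hMv
          obtain ⟨n, hn, hocc⟩ := hMv
          have hnt : n ∉ t := by
            intro hmem
            exact hT0 (hT.mp (by rw [List.any_eq_true]; exact ⟨n, hmem, hocc⟩))
          have hnp : n ∉ p := by
            intro hmem
            have : p.any (fun n => PySem.Str.isIn n line) = true := by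
              rw [List.any_eq_true]; exact ⟨n, hmem, hocc⟩
            rw [this] at hPv; exact Bool.noConfusion hPv
          exact (pvMem_vals t p m line 2 (by omega)).mpr ⟨n, by rw [pvGet_rank]; simp [hnt, hnp, hn], hocc⟩
        have hle := pvMinf_le_mem _ 3 2 h2
        have hne01 : pvMinf 3 (pvVals t p m line) ≠ 0 ∧ pvMinf 3 (pvVals t p m line) ≠ 1 := by
          constructor <;> intro h <;> rcases pvMinf_mem (pvVals t p m line) 3 with hm | hm <;> rw [h] at hm
          · exact absurd hm (by omega)
          · exact hT0 hm
          · exact absurd hm (by omega)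
          · exact hP1 hm
        show pvMinf 3 (pvVals t p m line) = 2
        omega
      | false =>
        have hM2 : (2 : Nat) ∉ pvVals t p m line := fun h => by rw [h2of h] at hMv; exact Bool.noConfusion hMv
        have hle := pvMinf_le_init (pvVals t p m line) 3
        show pvMinf 3 (pvVals t p m line) = 3
        rcases pvMinf_mem (pvVals t p m line) 3 with hm | hm
        · omega
        · rcases Nat.lt_or_ge (pvMinf 3 (pvVals t p m line)) 3 with hlt | hge
          · exfalso
            rcases (by omega : pvMinf 3 (pvVals t p m line) = 0 ∨ pvMinf 3 (pvVals t p m line) = 1 ∨ pvMinf 3 (pvVals t p m line) = 2) with h | h | h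
            · exact hT0 (h ▸ hm)
            · exact hP1 (h ▸ hm)
            · exact hM2 (h ▸ hm)
          · omega

-- the nested foldl of port B is pvMinf over pvVals
theorem pvFold_eq_minf (t p m : List String) (line : String) :
    (PySem.Set.ofList ((pvRanks t p m).keys.map (fun name => PySem.Str.len name))).foldl
      (fun best k =>
        (PySem.List.pyRange 0 ((PySem.Str.len line : Int) - (k : Int) + 1) 1).foldl (fun best i =>
          let r := (pvRanks t p m).getD (PySem.Str.slice line (some i) (some (i + (k : Int)))) 3
          if r < best then r else best) best) 3
      = pvMinf 3 (pvVals t p m line) := by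
  rw [pvMinf, pvVals, List.foldl_flatMap]
  simp only [List.foldl_map]

-- ===== VERDICT (by name: the statement is the Claim_ definition above) =====
theorem categorize_entry_by_names_spec : Claim_equal_categorize_entry_by_names := by
  intro entry p t m _
  unfold Spec_categorize_entry_by_names categorize_entry_by_names categorize_entry_by_names_alt
  have hranks : [(0, t), (1, p), (2, m)].foldl
      (fun d (pr : Nat × List String) => pvAddNames d pr.1 pr.2) PySem.Dict.empty = pvRanks t p m := by
    rfl
  simp only [hranks]
  rw [pvFold_eq_minf, pvBest_eq]
  set line := PySem.Str.lower (((PySem.Str.split? entry "\n").getD []).headD "") with hline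
  cases hT : t.any (fun n => PySem.Str.isIn n line) <;>
    cases hP : p.any (fun n => PySem.Str.isIn n line) <;>
      cases hM : m.any (fun n => PySem.Str.isIn n line) <;> simp <;> rfl
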